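-- pv_equiv track=rewrite | github.com/huhudaya/leetcode- | 程序员面试金典/面试题 08.02. 迷路的机器人.py | pathWithObstacles
-- ===== SOURCE A (Python) =====
-- from typing import List
--
-- def pathWithObstacles(obstacleGrid: List[List[int]]) -> List[List[int]]:
--     m = len(obstacleGrid)
--     n = len(obstacleGrid[0])
--     directions = [[0, 1], [1, 0]]
--     res = []
--     marked = [[False] * n for i in range(m)]
--
--     def dfs(i, j, path):
--         marked[i][j] = True
--         if obstacleGrid[i][j] == 1:
--             return False
--         # 使用回溯
--         path.append([i, j])
--         if i == m - 1 and j == n - 1: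
--             return True
--         for di in directions:
--             row = i + di[0]
--             col = j + di[1]
--             if not (0 <= row < m and 0 <= col < n):
--                 continue
--             if obstacleGrid[row][col] == 1 or marked[row][col]:
--                 continue
--             if dfs(row, col, path):
--                 return True
--         # 回溯 pop
--         path.pop()
--         return False
--
--     dfs(0, 0, res)
--     return res
-- ===== SOURCE B (Python) =====
-- def pathWithObstacles(obstacleGrid):
--     m = len(obstacleGrid)
--     n = len(obstacleGrid[0])
--     # Backward DP: build reachability-to-goal table bottom-up, then greedily
--     # reconstruct the right-first path forward.
--     rows = []
--     below = None
--     for row in reversed(obstacleGrid):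
--         cur = [False] * n
--         for j in range(n - 1, -1, -1):
--             if row[j] != 1:
--                 if j + 1 < n:
--                     cur[j] = cur[j + 1] or (below is not None and below[j])
--                 else:
--                     cur[j] = True if below is None else below[j]
--         rows.append(cur)
--         below = cur
--     reach = rows[::-1]
--     if not reach[0][0]:
--         return []
--     path = []
--     i = j = 0
--     while True:
--         path.append([i, j])
--         if i == m - 1 and j == n - 1:
--             return path
--         if j + 1 < n and reach[i][j + 1]:
--             j += 1
--         else:
--             i += 1
-- ===== Notes on version B (the rewrite author's own statement) =====
-- stated objective: alternative
-- what changed: Replaces the recursive right-first backtracking DFS with a visited matrix by a backward boolean reachability DP (built bottom-up row by row) followed by a forward greedy right-first path reconstruction.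
-- outside the precondition, e.g. on pathWithObstacles([[0, 1], [1]]): A returns [], B raises IndexError
import Mathlib
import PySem

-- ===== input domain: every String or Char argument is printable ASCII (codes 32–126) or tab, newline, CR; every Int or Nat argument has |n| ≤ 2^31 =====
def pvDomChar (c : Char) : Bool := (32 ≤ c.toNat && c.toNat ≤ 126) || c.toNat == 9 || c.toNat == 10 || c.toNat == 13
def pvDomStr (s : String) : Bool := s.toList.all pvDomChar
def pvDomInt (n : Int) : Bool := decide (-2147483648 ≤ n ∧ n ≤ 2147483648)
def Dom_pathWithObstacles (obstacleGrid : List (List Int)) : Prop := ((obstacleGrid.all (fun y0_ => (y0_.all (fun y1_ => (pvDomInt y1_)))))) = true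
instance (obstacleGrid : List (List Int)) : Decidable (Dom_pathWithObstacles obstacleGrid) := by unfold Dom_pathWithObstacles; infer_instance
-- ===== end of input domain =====

-- B replaces A's right-first backtracking DFS by a backward reachability DP plus a
-- forward greedy right-first reconstruction (objective: alternative algorithm, same cost).

-- ===== PORT A =====
-- grid cell access (always used in range under Pre_)
def gget (g : List (List Int)) (i j : Nat) : Int := (g.getD i []).getD j 0
def mget (mk : List (List Bool)) (i j : Nat) : Bool := (mk.getD i []).getD j false
-- `marked[i][j] = v`
def mset (mk : List (List Bool)) (i j : Nat) (v : Bool) : List (List Bool) :=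
  mk.set i ((mk.getD i []).set j v)

-- literal transliteration of A's inner `dfs`, threading the mutated `marked` and `path`;
-- `path.pop()` on the (always nonempty) list is `dropLast`
def dfsA (g : List (List Int)) (m n i j : Nat) (marked : List (List Bool))
    (path : List (List Int)) : Bool × List (List Bool) × List (List Int) :=
  let markedS := mset marked i j true
  if gget g i j == 1 then (false, markedS, path)
  else
    let path1 := path ++ [[(i : Int), (j : Int)]]
    if i = m - 1 ∧ j = n - 1 then (true, markedS, path1)
    else
      -- direction [0, 1]
      let r1 :=
        if _h1 : i < m ∧ j + 1 < n then
          if gget g i (j+1) == 1 || mget markedS i (j+1) then (false, markedS, path1)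
          else dfsA g m n i (j+1) markedS path1
        else (false, markedS, path1)
      if r1.1 then r1
      else
        -- direction [1, 0]
        let r2 :=
          if _h2 : i + 1 < m ∧ j < n then
            if gget g (i+1) j == 1 || mget r1.2.1 (i+1) j then (false, r1.2.1, r1.2.2)
            else dfsA g m n (i+1) j r1.2.1 r1.2.2
          else (false, r1.2.1, r1.2.2)
        if r2.1 then r2
        else (false, r2.2.1, r2.2.2.dropLast)
termination_by (m - i) + (n - j)
decreasing_by all_goals omega

def pathWithObstacles (obstacleGrid : List (List Int)) : List (List Int) :=
  let m := obstacleGrid.length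
  let n := (obstacleGrid.getD 0 []).length
  (dfsA obstacleGrid m n 0 0 (List.replicate m (List.replicate n false)) []).2.2

-- ===== PORT B =====
def bget (t : List (List Bool)) (i j : Nat) : Bool := (t.getD i []).getD j false

-- one row of the reachability table, computed right-to-left (B's inner loop);
-- `bot` marks the bottom row, `below` is the already-computed row underneath
def reachRow : List Int → List Bool → Bool → List Bool
  | x :: xs, b :: bs, bot =>
    let rest := reachRow xs bs bot
    (if x != 1 then
       match rest with
       | r :: _ => r || (!bot && b)
       | [] => if bot then true else b
     else false) :: rest
  | _, _, _ => []

-- table built bottom-up (B's loop over `reversed(obstacleGrid)`)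
def buildReach (n : Nat) : List (List Int) → List (List Bool)
  | [] => []
  | row :: rest =>
    match buildReach n rest with
    | [] => [reachRow row (List.replicate n false) true]
    | b :: bs => reachRow row b false :: b :: bs

-- B's forward greedy walk; the fuel only makes the `while True` total and is never
-- exhausted on the inputs the claim covers
def walkB (reach : List (List Bool)) (m n : Nat) :
    Nat → Nat → Nat → List (List Int) → List (List Int)
  | 0, _, _, path => path
  | fuel+1, i, j, path =>
    let path1 := path ++ [[(i : Int), (j : Int)]]
    if i = m - 1 ∧ j = n - 1 then path1
    else if j + 1 < n ∧ bget reach i (j+1) = true then walkB reach m n fuel i (j+1) path1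
    else walkB reach m n fuel (i+1) j path1

def pathWithObstacles_alt (obstacleGrid : List (List Int)) : List (List Int) :=
  let m := obstacleGrid.length
  let n := (obstacleGrid.getD 0 []).length
  let reach := buildReach n obstacleGrid
  if bget reach 0 0 = false then []
  else walkB reach m n (m + n) 0 0 []

-- ===== PRECONDITION & SPEC =====
-- Pre_ excludes the empty grid / empty first row (A raises IndexError there) and ragged
-- grids with a row shorter than the first row, on which A raises on most inputs while
-- B's full-table backward pass always raises IndexError.
def Pre_pathWithObstacles (obstacleGrid : List (List Int)) : Prop :=
  0 < obstacleGrid.length ∧ 0 < (obstacleGrid.getD 0 []).length ∧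
    ∀ row ∈ obstacleGrid, (obstacleGrid.getD 0 []).length ≤ row.length

instance (obstacleGrid : List (List Int)) : Decidable (Pre_pathWithObstacles obstacleGrid) := by
  unfold Pre_pathWithObstacles; infer_instance

def pvWitness_pathWithObstacles : List (List Int) := [[0, 0], [1, 0]]

def Spec_pathWithObstacles (obstacleGrid : List (List Int)) (out : List (List Int)) : Prop :=
  out = pathWithObstacles_alt obstacleGrid
instance (obstacleGrid : List (List Int)) (out : List (List Int)) : Decidable (Spec_pathWithObstacles obstacleGrid out) := by unfold Spec_pathWithObstacles; infer_instance

-- ===== CLAIM (what is proved, stated in full; the proofs are below) =====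
def Claim_equal_pathWithObstacles : Prop := ∀ (obstacleGrid : List (List Int)), Dom_pathWithObstacles obstacleGrid → Pre_pathWithObstacles obstacleGrid → Spec_pathWithObstacles obstacleGrid (pathWithObstacles obstacleGrid)

-- ===== LEMMAS AND PROOFS =====

-- "from (i,j) the goal (m-1,n-1) is reachable by right/down moves through non-obstacle cells"
def reachF (g : List (List Int)) (m n i j : Nat) : Bool :=
  (!(gget g i j == 1)) &&
    ((i + 1 == m && j + 1 == n) ||
     (if _h : j + 1 < n then reachF g m n i (j+1) else false) ||
     (if _h : i + 1 < m then reachF g m n (i+1) j else false))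
termination_by (m - i) + (n - j)
decreasing_by all_goals omega

-- the right-first greedy path from (i,j) through reachable cells
def spineF (g : List (List Int)) (m n i j : Nat) : List (List Int) :=
  [(i : Int), (j : Int)] ::
    (if i + 1 = m ∧ j + 1 = n then []
     else if hguard1 : j + 1 < n ∧ reachF g m n i (j+1) = true then spineF g m n i (j+1)
     else if hguard2 : i + 1 < m then spineF g m n (i+1) j
     else [])
termination_by (m - i) + (n - j)
decreasing_by all_goals omega

lemma mget_mset_ne (mk : List (List Bool)) (i j r c : Nat) (v : Bool)
    (h : ¬(r = i ∧ c = j)) :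
    mget (mset mk i j v) r c = mget mk r c := by
  unfold mget mset
  rcases eq_or_ne r i with rfl | hri
  · have hcj : c ≠ j := fun hc => h ⟨rfl, hc⟩
    by_cases hlen : r < mk.length
    · simp [List.getD_eq_getElem?_getD, List.getElem?_set, hlen, Ne.symm hcj]
    · simp [List.getD_eq_getElem?_getD, List.getElem?_set, hlen]
  · simp [List.getD_eq_getElem?_getD, List.getElem?_set, Ne.symm hri]

lemma mget_init (m n r c : Nat) :
    mget (List.replicate m (List.replicate n false)) r c = false := by
  unfold mget
  by_cases hr : r < m
  · by_cases hc : c < n <;>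
      simp [List.getD_eq_getElem?_getD, List.getElem?_replicate, hr, hc]
  · have h0 : (List.replicate m (List.replicate n false))[r]? = none :=
      List.getElem?_eq_none (by simpa using Nat.le_of_not_lt hr)
    simp [List.getD_eq_getElem?_getD, h0]

-- main characterisation of A's dfs: its boolean is reachability, on success the path
-- grows by the greedy spine, and on failure every newly marked cell is dead
set_option maxHeartbeats 1600000 in
lemma dfs_correct (g : List (List Int)) (m n : Nat) :
    ∀ N i j marked path, (m - i) + (n - j) ≤ N → i < m → j < n →
    (∀ r c, r < m → c < n → i ≤ r → j ≤ c → mget marked r c = true →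
      reachF g m n r c = false) →
    (dfsA g m n i j marked path).1 = reachF g m n i j
    ∧ (dfsA g m n i j marked path).2.2
        = path ++ (if reachF g m n i j = true then spineF g m n i j else [])
    ∧ (∀ r c, r < m → c < n → mget (dfsA g m n i j marked path).2.1 r c = true →
        mget marked r c = true ∨ (i ≤ r ∧ j ≤ c))
    ∧ (reachF g m n i j = false →
        ∀ r c, r < m → c < n → i ≤ r → j ≤ c →
          mget (dfsA g m n i j marked path).2.1 r c = true → reachF g m n r c = false) := by
  intro N
  induction N with
  | zero => intro i j marked path hN hi hj _; omega
  | succ N ihN =>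
    intro i j marked path hN hi hj hinv
    have hmarkS : ∀ r c, mget (mset marked i j true) r c = true →
        mget marked r c = true ∨ (r = i ∧ c = j) := by
      intro r c hmk
      by_cases hij : r = i ∧ c = j
      · exact Or.inr hij
      · exact Or.inl (by rwa [mget_mset_ne marked i j r c true hij] at hmk)
    rw [dfsA]
    by_cases hob : (gget g i j == 1) = true
    · rw [if_pos hob]
      have hreach : reachF g m n i j = false := by rw [reachF]; simp [hob]
      refine ⟨by simp [hreach], by simp [hreach], ?_, ?_⟩
      · intro r c hr hc hmk
        rcases hmarkS r c hmk with h | h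
        · exact Or.inl h
        · exact Or.inr ⟨by omega, by omega⟩
      · intro _ r c hr hc hir hjc hmk
        rcases hmarkS r c hmk with h | h
        · exact hinv r c hr hc hir hjc h
        · obtain ⟨rfl, rfl⟩ := h
          exact hreach
    · rw [if_neg hob]
      have hob' : (gget g i j == 1) = false := by
        cases hx : (gget g i j == 1)
        · rfl
        · exact absurd hx hob
      by_cases hgoal : i = m - 1 ∧ j = n - 1
      · rw [if_pos hgoal]
        have hi1 : i + 1 = m := by omega
        have hj1 : j + 1 = n := by omega
        have hreach : reachF g m n i j = true := by
          rw [reachF]; simp [hob', hi1, hj1]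
        have hspine : spineF g m n i j = [[(i : Int), (j : Int)]] := by
          rw [spineF, if_pos ⟨hi1, hj1⟩]
        refine ⟨by simp [hreach], by simp [hreach, hspine], ?_, ?_⟩
        · intro r c hr hc hmk
          rcases hmarkS r c hmk with h | h
          · exact Or.inl h
          · exact Or.inr ⟨by omega, by omega⟩
        · intro hf
          rw [hreach] at hf
          simp at hf
      · rw [if_neg hgoal]
        have hgoal' : ¬(i + 1 = m ∧ j + 1 = n) := by omega
        have hgB : ((i + 1 == m) && (j + 1 == n)) = false := by
          by_cases hA : i + 1 = m
          · have hB : j + 1 ≠ n := by omega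
            simp [hA, hB]
          · simp [hA]
        -- concluding step shared by every branch once the second direction is resolved
        have last : ∀ (r2 : Bool × List (List Bool) × List (List Int)),
            (j + 1 < n → reachF g m n i (j+1) = false) →
            (r2.1 = true → i + 1 < m ∧ reachF g m n (i+1) j = true ∧
              r2.2.2 = (path ++ [[(i : Int), (j : Int)]]) ++ spineF g m n (i+1) j) →
            (r2.1 = false → (i + 1 < m → reachF g m n (i+1) j = false) ∧
              r2.2.2 = path ++ [[(i : Int), (j : Int)]]) →
            (∀ r c, r < m → c < n → mget r2.2.1 r c = true →
              mget marked r c = true ∨ (i ≤ r ∧ j ≤ c)) →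
            (r2.1 = false → ∀ r c, r < m → c < n → i ≤ r → j ≤ c → mget r2.2.1 r c = true →
              (r = i ∧ c = j) ∨ reachF g m n r c = false) →
            ((if r2.1 = true then r2 else (false, r2.2.1, r2.2.2.dropLast)).1 = reachF g m n i j
             ∧ (if r2.1 = true then r2 else (false, r2.2.1, r2.2.2.dropLast)).2.2
                 = path ++ (if reachF g m n i j = true then spineF g m n i j else [])
             ∧ (∀ r c, r < m → c < n →
                  mget (if r2.1 = true then r2 else (false, r2.2.1, r2.2.2.dropLast)).2.1 r c = true →
                  mget marked r c = true ∨ (i ≤ r ∧ j ≤ c))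
             ∧ (reachF g m n i j = false →
                  ∀ r c, r < m → c < n → i ≤ r → j ≤ c →
                  mget (if r2.1 = true then r2 else (false, r2.2.1, r2.2.2.dropLast)).2.1 r c = true →
                  reachF g m n r c = false)) := by
          intro r2 hrF hGT hGF hGnew hGdead
          by_cases hb : r2.1 = true
          · rw [if_pos hb]
            obtain ⟨him, hdown, hpath⟩ := hGT hb
            have hreach : reachF g m n i j = true := by
              rw [reachF]
              by_cases hjn : j + 1 < n
              · rw [dif_pos hjn, dif_pos him]; simp [hob', hdown]
              · rw [dif_neg hjn, dif_pos him]; simp [hob', hdown]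
            have hnr : ¬(j + 1 < n ∧ reachF g m n i (j+1) = true) := by
              rintro ⟨ha, hbx⟩
              rw [hrF ha] at hbx
              simp at hbx
            have hspine : spineF g m n i j = [(i : Int), (j : Int)] :: spineF g m n (i+1) j := by
              rw [spineF, if_neg hgoal', dif_neg hnr, dif_pos him]
            refine ⟨hb.trans hreach.symm, ?_, ?_, ?_⟩
            · simp [hpath, hreach, hspine]
            · intro r c hr hc hmk
              exact hGnew r c hr hc hmk
            · intro hf
              rw [hreach] at hf
              simp at hf
          · rw [if_neg hb]
            have hb' : r2.1 = false := by
              cases hx : r2.1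
              · rfl
              · exact absurd hx hb
            obtain ⟨hdownF, hpath⟩ := hGF hb'
            have hmid : (if _h : j + 1 < n then reachF g m n i (j+1) else false) = false := by
              by_cases hjn : j + 1 < n
              · rw [dif_pos hjn]; exact hrF hjn
              · rw [dif_neg hjn]
            have hdn : (if _h : i + 1 < m then reachF g m n (i+1) j else false) = false := by
              by_cases him : i + 1 < m
              · rw [dif_pos him]; exact hdownF him
              · rw [dif_neg him]
            have hreach : reachF g m n i j = false := by
              rw [reachF, hmid, hdn, hgB]; simp
            have hdrop : (path ++ [[(i : Int), (j : Int)]]).dropLast = path := by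
              simp
            refine ⟨by simp [hreach], by simp [hreach, hpath, hdrop], ?_, ?_⟩
            · intro r c hr hc hmk
              exact hGnew r c hr hc hmk
            · intro _ r c hr hc hir hjc hmk
              rcases hGdead hb' r c hr hc hir hjc hmk with h | h
              · obtain ⟨rfl, rfl⟩ := h
                exact hreach
              · exact h
        -- second direction, for any state M1 left by the first one
        have down : ∀ (M1 : List (List Bool)),
            (j + 1 < n → reachF g m n i (j+1) = false) →
            (∀ r c, r < m → c < n → mget M1 r c = true →
              mget marked r c = true ∨ (i ≤ r ∧ j ≤ c)) →
            (∀ r c, r < m → c < n → i ≤ r → j ≤ c → mget M1 r c = true →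
              (r = i ∧ c = j) ∨ reachF g m n r c = false) →
            (let r2 := if _h2 : i + 1 < m ∧ j < n then
                (if (gget g (i+1) j == 1 || mget M1 (i+1) j) = true then
                   (false, M1, path ++ [[(i : Int), (j : Int)]])
                 else dfsA g m n (i+1) j M1 (path ++ [[(i : Int), (j : Int)]]))
               else (false, M1, path ++ [[(i : Int), (j : Int)]]);
             (if r2.1 = true then r2 else (false, r2.2.1, r2.2.2.dropLast)).1 = reachF g m n i j
             ∧ (if r2.1 = true then r2 else (false, r2.2.1, r2.2.2.dropLast)).2.2
                 = path ++ (if reachF g m n i j = true then spineF g m n i j else [])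
             ∧ (∀ r c, r < m → c < n →
                  mget (if r2.1 = true then r2 else (false, r2.2.1, r2.2.2.dropLast)).2.1 r c = true →
                  mget marked r c = true ∨ (i ≤ r ∧ j ≤ c))
             ∧ (reachF g m n i j = false →
                  ∀ r c, r < m → c < n → i ≤ r → j ≤ c →
                  mget (if r2.1 = true then r2 else (false, r2.2.1, r2.2.2.dropLast)).2.1 r c = true →
                  reachF g m n r c = false)) := by
          intro M1 hrF hM1new hM1dead
          dsimp only
          by_cases h2 : i + 1 < m ∧ j < n
          · rw [dif_pos h2]
            by_cases hskip2 : (gget g (i+1) j == 1 || mget M1 (i+1) j) = true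
            · rw [if_pos hskip2]
              have hdF : i + 1 < m → reachF g m n (i+1) j = false := by
                intro _
                rcases (by simpa using hskip2 :
                    (gget g (i+1) j == 1) = true ∨ mget M1 (i+1) j = true) with hgg | hmk
                · rw [reachF]; simp [hgg]
                · rcases hM1dead (i+1) j h2.1 hj (by omega) le_rfl hmk with h | h
                  · omega
                  · exact h
              exact last (false, M1, path ++ [[(i : Int), (j : Int)]]) hrF
                (by intro h; simp at h)
                (by intro _; exact ⟨hdF, rfl⟩)
                (fun r c hr hc hmk => hM1new r c hr hc hmk)
                (fun _ r c hr hc hir hjc hmk => hM1dead r c hr hc hir hjc hmk)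
            · rw [if_neg hskip2]
              have hinvD : ∀ r c, r < m → c < n → i + 1 ≤ r → j ≤ c → mget M1 r c = true →
                  reachF g m n r c = false := by
                intro r c hr hc hir hjc hmk
                rcases hM1dead r c hr hc (by omega) hjc hmk with h | h
                · omega
                · exact h
              obtain ⟨B1, B2, B4, B5⟩ :=
                ihN (i+1) j M1 (path ++ [[(i : Int), (j : Int)]]) (by omega) h2.1 hj hinvD
              exact last (dfsA g m n (i+1) j M1 (path ++ [[(i : Int), (j : Int)]])) hrF
                (by intro h
                    have hrf : reachF g m n (i+1) j = true := B1.symm.trans h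
                    refine ⟨h2.1, hrf, ?_⟩
                    rw [B2, hrf]
                    simp)
                (by intro h
                    have hrf : reachF g m n (i+1) j = false := B1.symm.trans h
                    refine ⟨fun _ => hrf, ?_⟩
                    rw [B2, hrf]
                    simp)
                (by intro r c hr hc hmk
                    rcases B4 r c hr hc hmk with h | h
                    · exact hM1new r c hr hc h
                    · exact Or.inr ⟨by omega, h.2⟩)
                (by intro hbf r c hr hc hir hjc hmk
                    have hrf : reachF g m n (i+1) j = false := B1.symm.trans hbf
                    rcases B4 r c hr hc hmk with h | h
                    · exact hM1dead r c hr hc hir hjc h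
                    · exact Or.inr (B5 hrf r c hr hc h.1 h.2 hmk))
          · rw [dif_neg h2]
            have hdF : i + 1 < m → reachF g m n (i+1) j = false := by
              intro h
              exact absurd ⟨h, hj⟩ h2
            exact last (false, M1, path ++ [[(i : Int), (j : Int)]]) hrF
              (by intro h; simp at h)
              (by intro _; exact ⟨hdF, rfl⟩)
              (fun r c hr hc hmk => hM1new r c hr hc hmk)
              (fun _ r c hr hc hir hjc hmk => hM1dead r c hr hc hir hjc hmk)
        -- facts about the state after marking (i,j)
        have hMSnew : ∀ r c, r < m → c < n → mget (mset marked i j true) r c = true →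
            mget marked r c = true ∨ (i ≤ r ∧ j ≤ c) := by
          intro r c _ _ hmk
          rcases hmarkS r c hmk with h | h
          · exact Or.inl h
          · exact Or.inr ⟨by omega, by omega⟩
        have hMSdead : ∀ r c, r < m → c < n → i ≤ r → j ≤ c →
            mget (mset marked i j true) r c = true →
            (r = i ∧ c = j) ∨ reachF g m n r c = false := by
          intro r c hr hc hir hjc hmk
          rcases hmarkS r c hmk with h | h
          · exact Or.inr (hinv r c hr hc hir hjc h)
          · exact Or.inl h
        -- first direction
        by_cases h1 : i < m ∧ j + 1 < n
        · rw [dif_pos h1]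
          by_cases hskip1 : (gget g i (j+1) == 1 || mget (mset marked i j true) i (j+1)) = true
          · rw [if_pos hskip1]
            dsimp only
            have hrF : j + 1 < n → reachF g m n i (j+1) = false := by
              intro _
              rcases (by simpa using hskip1 :
                  (gget g i (j+1) == 1) = true ∨ mget (mset marked i j true) i (j+1) = true) with
                hgg | hmk
              · rw [reachF]; simp [hgg]
              · rcases hMSdead i (j+1) hi h1.2 le_rfl (by omega) hmk with h | h
                · omega
                · exact h
            exact down (mset marked i j true) hrF hMSnew hMSdead
          · rw [if_neg hskip1]
            have hinvR : ∀ r c, r < m → c < n → i ≤ r → j + 1 ≤ c →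
                mget (mset marked i j true) r c = true → reachF g m n r c = false := by
              intro r c hr hc hir hjc hmk
              rcases hMSdead r c hr hc hir (by omega) hmk with h | h
              · omega
              · exact h
            obtain ⟨A1, A2, A4, A5⟩ :=
              ihN i (j+1) (mset marked i j true) (path ++ [[(i : Int), (j : Int)]])
                (by omega) hi h1.2 hinvR
            by_cases hr1 : reachF g m n i (j+1) = true
            · have hA1 : (dfsA g m n i (j+1) (mset marked i j true)
                  (path ++ [[(i : Int), (j : Int)]])).1 = true := A1.trans hr1
              rw [if_pos hA1]
              have hreach : reachF g m n i j = true := by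
                rw [reachF, dif_pos h1.2]; simp [hob', hr1]
              have hspine : spineF g m n i j = [(i : Int), (j : Int)] :: spineF g m n i (j+1) := by
                rw [spineF, if_neg hgoal', dif_pos ⟨h1.2, hr1⟩]
              refine ⟨(A1.trans hr1).trans hreach.symm, ?_, ?_, ?_⟩
              · rw [A2, hr1]
                simp [hreach, hspine]
              · intro r c hr hc hmk
                rcases A4 r c hr hc hmk with h | h
                · exact hMSnew r c hr hc h
                · exact Or.inr ⟨h.1, by omega⟩
              · intro hf
                rw [hreach] at hf
                simp at hf
            · have hr1' : reachF g m n i (j+1) = false := by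
                cases hx : reachF g m n i (j+1)
                · rfl
                · exact absurd hx hr1
              have hA1n : ¬((dfsA g m n i (j+1) (mset marked i j true)
                  (path ++ [[(i : Int), (j : Int)]])).1 = true) := by
                rw [A1, hr1']
                simp
              rw [if_neg hA1n]
              have hA2 : (dfsA g m n i (j+1) (mset marked i j true)
                  (path ++ [[(i : Int), (j : Int)]])).2.2 = path ++ [[(i : Int), (j : Int)]] := by
                rw [A2, hr1']
                simp
              rw [hA2]
              have hrF : j + 1 < n → reachF g m n i (j+1) = false := fun _ => hr1'
              have hM1new : ∀ r c, r < m → c < n →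
                  mget ((dfsA g m n i (j+1) (mset marked i j true)
                    (path ++ [[(i : Int), (j : Int)]])).2.1) r c = true →
                  mget marked r c = true ∨ (i ≤ r ∧ j ≤ c) := by
                intro r c hr hc hmk
                rcases A4 r c hr hc hmk with h | h
                · exact hMSnew r c hr hc h
                · exact Or.inr ⟨h.1, by omega⟩
              have hM1dead : ∀ r c, r < m → c < n → i ≤ r → j ≤ c →
                  mget ((dfsA g m n i (j+1) (mset marked i j true)
                    (path ++ [[(i : Int), (j : Int)]])).2.1) r c = true →
                  (r = i ∧ c = j) ∨ reachF g m n r c = false := by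
                intro r c hr hc hir hjc hmk
                rcases A4 r c hr hc hmk with h | h
                · exact hMSdead r c hr hc hir hjc h
                · exact Or.inr (A5 hr1' r c hr hc h.1 h.2 hmk)
              exact down ((dfsA g m n i (j+1) (mset marked i j true)
                (path ++ [[(i : Int), (j : Int)]])).2.1) hrF hM1new hM1dead
        · rw [dif_neg h1]
          dsimp only
          have hrF : j + 1 < n → reachF g m n i (j+1) = false := by
            intro h
            exact absurd ⟨hi, h⟩ h1
          exact down (mset marked i j true) hrF hMSnew hMSdead

lemma reachRow_length (cells : List Int) (below : List Bool) (bot : Bool)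
    (h : below.length ≤ cells.length) :
    (reachRow cells below bot).length = below.length := by
  induction cells generalizing below with
  | nil =>
    have hb : below = [] := List.length_eq_zero_iff.mp (Nat.le_zero.mp (by simpa using h))
    subst hb
    simp [reachRow]
  | cons x xs ih =>
    cases below with
    | nil => simp [reachRow]
    | cons b bs =>
      simp only [reachRow, List.length_cons]
      rw [ih bs (by simpa using h)]

lemma reachRow_getD (cells : List Int) (below : List Bool) (bot : Bool) (j : Nat)
    (hj : j < below.length) (hle : below.length ≤ cells.length) :
    (reachRow cells below bot).getD j false =
      ((cells.getD j 0 != 1) &&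
        (if j + 1 < below.length then
            ((reachRow cells below bot).getD (j+1) false || (!bot && below.getD j false))
         else (if bot then true else below.getD j false))) := by
  induction cells generalizing below j with
  | nil =>
    have hb : below = [] := List.length_eq_zero_iff.mp (Nat.le_zero.mp (by simpa using hle))
    subst hb
    simp at hj
  | cons x xs ih =>
    cases below with
    | nil => simp at hj
    | cons b bs =>
      have hle' : bs.length ≤ xs.length := by simpa using hle
      have hcons : reachRow (x :: xs) (b :: bs) bot =
          (if x != 1 then
             match reachRow xs bs bot with
             | r :: _ => r || (!bot && b)
             | [] => if bot then true else b
           else false) :: reachRow xs bs bot := rfl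
      cases j with
      | zero =>
        cases bs with
        | nil =>
          have hrest : reachRow xs [] bot = [] := by cases xs <;> rfl
          rw [hcons, hrest]
          simp only [List.getD_cons_zero, List.length_cons, List.length_nil]
          rw [if_neg (by omega : ¬ (0 : Nat) + 1 < 0 + 1)]
          cases hx : x != 1 <;> simp [hx]
        | cons b2 bs2 =>
          obtain ⟨r, t, hrt⟩ : ∃ r t, reachRow xs (b2 :: bs2) bot = r :: t := by
            have hlen := reachRow_length xs (b2 :: bs2) bot hle'
            cases hxx : reachRow xs (b2 :: bs2) bot with
            | nil => rw [hxx] at hlen; simp at hlen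
            | cons r t => exact ⟨r, t, rfl⟩
          rw [hcons, hrt]
          simp only [List.getD_cons_zero, List.getD_cons_succ, List.length_cons]
          rw [if_pos (by omega : (0 : Nat) + 1 < bs2.length + 1 + 1)]
          cases hx : x != 1 <;> simp [hx]
      | succ j' =>
        rw [hcons]
        simp only [List.getD_cons_succ, List.length_cons, Nat.add_lt_add_iff_right]
        exact ih bs j' (by simpa using hj) hle'

lemma buildReach_nil (n : Nat) : buildReach n [] = [] := rfl

lemma buildReach_cons (n : Nat) (row : List Int) (rest : List (List Int)) :
    buildReach n (row :: rest) =
      match buildReach n rest with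
      | [] => [reachRow row (List.replicate n false) true]
      | b :: bs => reachRow row b false :: b :: bs := rfl

lemma buildReach_rows (n : Nat) :
    ∀ (t : List (List Int)), (∀ row ∈ t, n ≤ row.length) →
      ∀ r ∈ buildReach n t, r.length = n := by
  intro t
  induction t with
  | nil => intro _ r hr; simp [buildReach_nil] at hr
  | cons row rest ih =>
    intro h r hr
    cases hbb : buildReach n rest with
    | nil =>
      have htab : buildReach n (row :: rest) = [reachRow row (List.replicate n false) true] := by
        rw [buildReach_cons, hbb]
      rw [htab, List.mem_singleton] at hr
      subst hr
      rw [reachRow_length row (List.replicate n false) true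
        (by simpa using h row (List.mem_cons_self))]
      simp
    | cons b bs =>
      have htab : buildReach n (row :: rest) = reachRow row b false :: b :: bs := by
        rw [buildReach_cons, hbb]
      rw [htab, List.mem_cons] at hr
      rcases hr with hr | hr
      · subst hr
        have hble : b.length = n :=
          ih (fun rr hrr => h rr (List.mem_cons_of_mem _ hrr)) b (hbb ▸ List.mem_cons_self)
        rw [reachRow_length row b false (by rw [hble]; exact h row (List.mem_cons_self))]
        exact hble
      · exact ih (fun rr hrr => h rr (List.mem_cons_of_mem _ hrr)) r (hbb ▸ hr)

set_option maxHeartbeats 800000 in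
lemma buildReach_correct (g : List (List Int)) (m n : Nat)
    (hm : m = g.length) (hrows : ∀ row ∈ g, n ≤ row.length) :
    ∀ t k, t = g.drop k → k ≤ m →
      ∀ i j, i < m - k → j < n →
        bget (buildReach n t) i j = reachF g m n (k + i) j := by
  intro t
  induction t with
  | nil =>
    intro k ht _ i j hi _
    exfalso
    have hlen := congrArg List.length ht
    simp [List.length_drop] at hlen
    omega
  | cons row rest ih =>
    intro k ht hk i j hi hj
    have hkm : k < m := by omega
    have h0 : (g.drop k)[0]? = some row := by rw [← ht]; rfl
    rw [List.getElem?_drop] at h0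
    obtain ⟨hklt, hgk⟩ := List.getElem?_eq_some_iff.mp (by simpa using h0)
    have hrow : g.getD k [] = row := by
      simp [List.getD_eq_getElem?_getD, List.getElem?_eq_getElem hklt, hgk]
    have hrowmem : row ∈ g := hgk ▸ List.getElem_mem hklt
    have hrowlen : n ≤ row.length := hrows row hrowmem
    have hrest : rest = g.drop (k + 1) := by
      rw [show g.drop (k + 1) = (g.drop k).drop 1 from by rw [List.drop_drop], ← ht]
      simp
    have hget : ∀ jj, gget g k jj = row.getD jj 0 := by
      intro jj
      rw [gget, hrow]
    cases rest with
    | nil =>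
      have hmk : m = k + 1 := by
        have hlen := congrArg List.length ht
        simp [List.length_drop] at hlen
        omega
      have hi0 : i = 0 := by omega
      subst hi0
      have htab : buildReach n [row] = [reachRow row (List.replicate n false) true] := by
        rw [buildReach_cons, buildReach_nil]
      have key : ∀ d jj, jj < n → n - jj ≤ d →
          (reachRow row (List.replicate n false) true).getD jj false = reachF g m n k jj := by
        intro d
        induction d with
        | zero => intro jj hjj hd; omega
        | succ d ihd =>
          intro jj hjj hd
          rw [reachRow_getD row (List.replicate n false) true jj (by simpa using hjj)
            (by simpa using hrowlen)]
          rw [reachF]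
          rw [dif_neg (show ¬ k + 1 < m by omega)]
          have hkm1 : ((k + 1 : Nat) == m) = true := by simp [hmk]
          by_cases hjn : jj + 1 < n
          · rw [dif_pos hjn, ihd (jj+1) hjn (by omega)]
            have hne : ((jj + 1 : Nat) == n) = false := by simp [Nat.ne_of_lt hjn]
            simp [hget, List.length_replicate, hjn, hne, hkm1, bne]
          · rw [dif_neg hjn]
            have hjeq : jj + 1 = n := by omega
            have heqn : ((jj + 1 : Nat) == n) = true := by simp [hjeq]
            simp [hget, List.length_replicate, hjn, heqn, hkm1, bne]
      have hk0 := key (n - j) j hj le_rfl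
      simpa [bget, htab] using hk0
    | cons row2 rest2 =>
      have hk1m : k + 1 < m := by
        have hlen := congrArg List.length ht
        simp [List.length_drop] at hlen
        omega
      obtain ⟨b, bs, hb⟩ : ∃ b bs, buildReach n (row2 :: rest2) = b :: bs := by
        cases hbb : buildReach n (row2 :: rest2) with
        | nil =>
          exfalso
          cases h2 : buildReach n rest2 <;> rw [buildReach_cons, h2] at hbb <;> simp at hbb
        | cons b bs => exact ⟨b, bs, rfl⟩
      have htab : buildReach n (row :: row2 :: rest2) = reachRow row b false :: b :: bs := by
        rw [buildReach_cons, hb]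
      have ihk := ih (k + 1) hrest (by omega)
      have hbrow : ∀ jj, jj < n → b.getD jj false = reachF g m n (k+1) jj := by
        intro jj hjj
        have h5 := ihk 0 jj (by omega) hjj
        simpa [bget, hb] using h5
      have hblen : b.length = n := by
        refine buildReach_rows n (row2 :: rest2) ?_ b (hb ▸ List.mem_cons_self)
        intro rr hrr
        exact hrows rr (List.mem_of_mem_drop (hrest ▸ hrr))
      cases i with
      | zero =>
        have key : ∀ d jj, jj < n → n - jj ≤ d →
            (reachRow row b false).getD jj false = reachF g m n k jj := by
          intro d
          induction d with
          | zero => intro jj hjj hd; omega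
          | succ d ihd =>
            intro jj hjj hd
            rw [reachRow_getD row b false jj (by rw [hblen]; exact hjj)
              (by rw [hblen]; exact hrowlen)]
            rw [reachF]
            rw [dif_pos hk1m, hbrow jj hjj]
            have hkm1 : ((k + 1 : Nat) == m) = false := by simp [Nat.ne_of_lt hk1m]
            by_cases hjn : jj + 1 < n
            · rw [dif_pos hjn, ihd (jj+1) hjn (by omega)]
              simp [hget, hblen, hjn, hkm1, bne]
            · rw [dif_neg hjn]
              simp [hget, hblen, hjn, hkm1, bne]
        have hk0 := key (n - j) j hj le_rfl
        simpa [bget, htab] using hk0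
      | succ i' =>
        have h5 := ihk i' j (by omega) hj
        have harith : k + 1 + i' = k + (i' + 1) := by omega
        rw [harith] at h5
        simpa [bget, htab, hb] using h5

lemma walkB_succ (table : List (List Bool)) (m n fuel i j : Nat) (path : List (List Int)) :
    walkB table m n (fuel + 1) i j path =
      (if i = m - 1 ∧ j = n - 1 then path ++ [[(i : Int), (j : Int)]]
       else if j + 1 < n ∧ bget table i (j+1) = true then
         walkB table m n fuel i (j+1) (path ++ [[(i : Int), (j : Int)]])
       else walkB table m n fuel (i+1) j (path ++ [[(i : Int), (j : Int)]])) := rfl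

lemma walkB_spine (g : List (List Int)) (m n : Nat) (table : List (List Bool))
    (htable : ∀ i j, i < m → j < n → bget table i j = reachF g m n i j) :
    ∀ fuel i j path, i < m → j < n → reachF g m n i j = true →
      (m - i) + (n - j) ≤ fuel →
      walkB table m n fuel i j path = path ++ spineF g m n i j := by
  intro fuel
  induction fuel with
  | zero => intro i j path hi hj _ hf; omega
  | succ fuel ih =>
    intro i j path hi hj hreach hf
    rw [walkB_succ]
    by_cases hgoal : i = m - 1 ∧ j = n - 1
    · rw [if_pos hgoal]
      have hsp : spineF g m n i j = [[(i : Int), (j : Int)]] := by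
        rw [spineF, if_pos (show i + 1 = m ∧ j + 1 = n by omega)]
      rw [hsp]
    · rw [if_neg hgoal]
      have hgoal' : ¬(i + 1 = m ∧ j + 1 = n) := by omega
      by_cases hright : j + 1 < n ∧ bget table i (j+1) = true
      · rw [if_pos hright]
        have hr' : reachF g m n i (j+1) = true := by
          rw [← htable i (j+1) hi hright.1]
          exact hright.2
        rw [ih i (j+1) _ hi hright.1 hr' (by omega)]
        have hsp : spineF g m n i j = [(i : Int), (j : Int)] :: spineF g m n i (j+1) := by
          rw [spineF, if_neg hgoal', dif_pos ⟨hright.1, hr'⟩]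
        rw [hsp]
        simp
      · rw [if_neg hright]
        have hmid : (if _h : j + 1 < n then reachF g m n i (j+1) else false) = false := by
          by_cases hjn : j + 1 < n
          · rw [dif_pos hjn]
            cases hx : reachF g m n i (j+1) with
            | false => rfl
            | true => exact absurd ⟨hjn, by rw [htable i (j+1) hi hjn]; exact hx⟩ hright
          · rw [dif_neg hjn]
        have hgB2 : ((i + 1 == m) && (j + 1 == n)) = false := by
          by_cases hA : i + 1 = m
          · have hB : j + 1 ≠ n := by omega
            simp [hA, hB]
          · simp [hA]
        have hdown : i + 1 < m ∧ reachF g m n (i+1) j = true := by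
          rw [reachF, hmid, hgB2] at hreach
          simp at hreach
          exact ⟨hreach.2.1, hreach.2.2⟩
        rw [ih (i+1) j _ hdown.1 hj hdown.2 (by omega)]
        have hnr : ¬(j + 1 < n ∧ reachF g m n i (j+1) = true) := by
          rintro ⟨ha, hbx⟩
          rw [dif_pos ha, hbx] at hmid
          simp at hmid
        have hsp : spineF g m n i j = [(i : Int), (j : Int)] :: spineF g m n (i+1) j := by
          rw [spineF, if_neg hgoal', dif_neg hnr, dif_pos hdown.1]
        rw [hsp]
        simp

-- ===== VERDICT (by name: the statement is the Claim_ definition above) =====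
theorem pathWithObstacles_spec : Claim_equal_pathWithObstacles := by
  intro g _hdom hpre
  obtain ⟨hm0, hn0, hrows⟩ := hpre
  have htable : ∀ i j, i < g.length → j < (g.getD 0 []).length →
      bget (buildReach (g.getD 0 []).length g) i j =
        reachF g g.length (g.getD 0 []).length i j := by
    intro i j hi hj
    have h := buildReach_correct g g.length (g.getD 0 []).length rfl hrows g 0 rfl
      (by omega) i j (by omega) hj
    simpa using h
  obtain ⟨hA1, hA2, _, _⟩ := dfs_correct g g.length (g.getD 0 []).length
      (g.length + (g.getD 0 []).length) 0 0
      (List.replicate g.length (List.replicate (g.getD 0 []).length false)) []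
      (by omega) hm0 hn0
      (by intro r c _ _ _ _ hmk
          rw [mget_init] at hmk
          exact absurd hmk Bool.false_ne_true)
  show pathWithObstacles g = pathWithObstacles_alt g
  unfold pathWithObstacles pathWithObstacles_alt
  dsimp only
  rw [hA2, htable 0 0 hm0 hn0]
  cases hreach : reachF g g.length (g.getD 0 []).length 0 0 with
  | false => simp [hreach]
  | true =>
    rw [if_neg (show ¬(true = false) by simp)]
    rw [walkB_spine g g.length (g.getD 0 []).length (buildReach (g.getD 0 []).length g) htable
      (g.length + (g.getD 0 []).length) 0 0 [] hm0 hn0 hreach (by omega)]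
    simp
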